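-- pv_equiv track=rewrite | github.com/KeckObservatory/RemoteObserving | get_vnc_sessions.py | determine_instrument
-- ===== SOURCE A (Python) =====
-- def determine_instrument(accountname):
--     accounts = {'mosfire':  [f'mosfire{i}' for i in range(1,10)],
--                 'hires':    [f'hires{i}'   for i in range(1,10)],
--                 'osiris':   [f'osiris{i}'  for i in range(1,10)],
--                 'lris':     [f'lris{i}'    for i in range(1,10)],
--                 'nires':    [f'nires{i}'   for i in range(1,10)],
--                 'deimos':   [f'deimos{i}'  for i in range(1,10)],
--                 'esi':      [f'esi{i}'     for i in range(1,10)],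
--                 'nirc2':    [f'nirc{i}'    for i in range(1,10)],
--                 'nirspec':  [f'nirspec{i}' for i in range(1,10)],
--                 'kcwi':     [f'kcwi{i}'    for i in range(1,10)],
--                }
--     accounts['mosfire'].append('moseng')
--     accounts['hires'].append('hireseng')
--     accounts['osiris'].append('osiriseng')
--     accounts['lris'].append('lriseng')
--     accounts['nires'].append('nireseng')
--     accounts['deimos'].append('dmoseng')
--     accounts['esi'].append('esieng')
--     accounts['nirc2'].append('nirceng')
--     accounts['nirspec'].append('nirspeceng')
--     accounts['kcwi'].append('kcwieng')
--
--     telescope = {'mosfire': 1,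
--                  'hires':   1,
--                  'osiris':  1,
--                  'lris':    1,
--                  'nires':   2,
--                  'deimos':  2,
--                  'esi':     2,
--                  'nirc2':   2,
--                  'nirspec': 2,
--                  'kcwi':    2,
--                 }
--
--     for instrument in accounts.keys():
--         if accountname.lower() in accounts[instrument]:
--             return instrument, telescope[instrument]
--
--     return None, None
-- ===== SOURCE B (Python) =====
-- _DATA = [
--     ("mosfire", "mosfire", "moseng",     1),
--     ("hires",   "hires",   "hireseng",   1),
--     ("osiris",  "osiris",  "osiriseng",  1),
--     ("lris",    "lris",    "lriseng",    1),
--     ("nires",   "nires",   "nireseng",   2),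
--     ("deimos",  "deimos",  "dmoseng",    2),
--     ("esi",     "esi",     "esieng",     2),
--     ("nirc2",   "nirc",    "nirceng",    2),
--     ("nirspec", "nirspec", "nirspeceng", 2),
--     ("kcwi",    "kcwi",    "kcwieng",    2),
-- ]
--
-- _TABLE = {}
-- for _inst, _pref, _eng, _tel in _DATA:
--     for _name in [f'{_pref}{i}' for i in range(1, 10)] + [_eng]:
--         _TABLE[_name] = (_inst, _tel)
--
--
-- def determine_instrument(accountname):
--     return _TABLE.get(accountname.lower(), (None, None))
-- ===== Notes on version B (the rewrite author's own statement) =====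
-- stated objective: simpler
-- what changed: Replaces A's per-call scan over ten instruments with a membership test in each instrument's account list by one flat account-name -> (instrument, telescope) dictionary built once at module load from the same data, so the function body is a single dict lookup with a (None, None) default.
import Mathlib
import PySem

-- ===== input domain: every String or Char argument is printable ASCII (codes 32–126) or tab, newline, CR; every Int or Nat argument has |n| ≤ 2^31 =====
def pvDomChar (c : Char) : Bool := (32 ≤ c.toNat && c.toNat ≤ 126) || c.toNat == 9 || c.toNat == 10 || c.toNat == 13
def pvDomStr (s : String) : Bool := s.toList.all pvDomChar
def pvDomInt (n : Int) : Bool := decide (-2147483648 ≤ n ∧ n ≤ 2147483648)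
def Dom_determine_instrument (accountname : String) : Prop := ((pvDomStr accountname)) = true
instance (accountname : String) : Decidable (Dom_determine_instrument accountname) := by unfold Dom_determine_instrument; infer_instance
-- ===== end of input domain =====

-- B replaces A's scan over instruments with membership tests by a single flat account→(instrument, telescope)
-- table built once and one lookup; objective: simpler/idiomatic (no speed claim).

-- ===== PORT A =====

-- [f'{pref}{i}' for i in range(1,10)]
def pvAcctList (pref : String) : List String :=
  (PySem.List.pyRange 1 10 1).map (fun i => pref ++ PySem.Int.toStr i)

-- the 'accounts' dict: literal dict, then the ten .append(...) calls (modify with ++ [eng])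
def pvAccountsA : PySem.Dict String (List String) :=
  (((((((((((PySem.Dict.ofList
    [("mosfire", pvAcctList "mosfire"), ("hires", pvAcctList "hires"),
     ("osiris", pvAcctList "osiris"), ("lris", pvAcctList "lris"),
     ("nires", pvAcctList "nires"), ("deimos", pvAcctList "deimos"),
     ("esi", pvAcctList "esi"), ("nirc2", pvAcctList "nirc"),
     ("nirspec", pvAcctList "nirspec"), ("kcwi", pvAcctList "kcwi")]).modify
      "mosfire" [] (· ++ ["moseng"])).modify
      "hires" [] (· ++ ["hireseng"])).modify
      "osiris" [] (· ++ ["osiriseng"])).modify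
      "lris" [] (· ++ ["lriseng"])).modify
      "nires" [] (· ++ ["nireseng"])).modify
      "deimos" [] (· ++ ["dmoseng"])).modify
      "esi" [] (· ++ ["esieng"])).modify
      "nirc2" [] (· ++ ["nirceng"])).modify
      "nirspec" [] (· ++ ["nirspeceng"])).modify
      "kcwi" [] (· ++ ["kcwieng"]))

def pvTelescopeA : PySem.Dict String Int :=
  PySem.Dict.ofList
    [("mosfire", 1), ("hires", 1), ("osiris", 1), ("lris", 1),
     ("nires", 2), ("deimos", 2), ("esi", 2), ("nirc2", 2),
     ("nirspec", 2), ("kcwi", 2)]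

-- Python's 'x in list': left-to-right equality scan
def pvIn (t : String) : List String → Bool
  | [] => false
  | x :: r => t == x || pvIn t r

-- the 'for instrument in accounts.keys()' loop; telescope[instrument] always hits a key,
-- so getD's default 0 is unreachable
def pvLoopA (accountname : String) : List String → Option String × Option Int
  | [] => (none, none)
  | k :: ks =>
    if pvIn (PySem.Str.lower accountname) (pvAccountsA.getD k []) then
      (some k, some (pvTelescopeA.getD k 0))
    else pvLoopA accountname ks

def determine_instrument (accountname : String) : Option String × Option Int :=
  pvLoopA accountname pvAccountsA.keys

-- ===== PORT B =====

-- _DATA: (instrument, account prefix, engineering alias, telescope)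
def pvDataB : List (String × String × String × Int) :=
  [("mosfire", "mosfire", "moseng", 1), ("hires", "hires", "hireseng", 1),
   ("osiris", "osiris", "osiriseng", 1), ("lris", "lris", "lriseng", 1),
   ("nires", "nires", "nireseng", 2), ("deimos", "deimos", "dmoseng", 2),
   ("esi", "esi", "esieng", 2), ("nirc2", "nirc", "nirceng", 2),
   ("nirspec", "nirspec", "nirspeceng", 2), ("kcwi", "kcwi", "kcwieng", 2)]

-- [f'{pref}{i}' for i in range(1,10)] + [eng]
def pvNamesB (pref eng : String) : List String :=
  ((PySem.List.pyRange 1 10 1).map (fun i => pref ++ PySem.Int.toStr i)) ++ [eng]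

-- _TABLE as an insertion-order association list (all keys distinct, so dict insert = append)
def pvTableB : List (String × String × Int) :=
  pvDataB.flatMap (fun q => (pvNamesB q.2.1 q.2.2.1).map (fun s => (s, q.1, q.2.2.2)))

-- _TABLE.get(t, default): first-match association-list lookup
def pvLookupB (t : String) : List (String × String × Int) → Option (String × Int)
  | [] => none
  | (k, v) :: r => if t == k then some v else pvLookupB t r

def determine_instrument_alt (accountname : String) : Option String × Option Int :=
  match pvLookupB (PySem.Str.lower accountname) pvTableB with
  | some (inst, tel) => (some inst, some tel)
  | none => (none, none)

-- ===== PRECONDITION & SPEC =====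
def Spec_determine_instrument (accountname : String) (out : Option String × Option Int) : Prop := out = determine_instrument_alt accountname
instance (accountname : String) (out : Option String × Option Int) : Decidable (Spec_determine_instrument accountname out) := by unfold Spec_determine_instrument; infer_instance

-- ===== CLAIM (what is proved, stated in full; the proofs are below) =====
def Claim_equal_determine_instrument : Prop := ∀ (accountname : String), Dom_determine_instrument accountname → Spec_determine_instrument accountname (determine_instrument accountname)

-- ===== LEMMAS AND PROOFS =====

-- looking up in a block of entries sharing one value = a membership test on the block's names
theorem pvLookupB_block (t : String) (v : String × Int) (names : List String)
    (rest : List (String × String × Int)) :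
    pvLookupB t (names.map (fun s => (s, v)) ++ rest) =
      if pvIn t names then some v else pvLookupB t rest := by
  induction names with
  | nil => simp [pvIn]
  | cons x xs ih =>
    simp only [List.map_cons, List.cons_append, pvLookupB, pvIn, Bool.or_eq_true]
    by_cases h : t == x
    · simp [h]
    · simp [h, ih]

set_option maxHeartbeats 2000000 in
theorem determine_instrument_spec' (a : String) :
    determine_instrument a = determine_instrument_alt a := by
  have hk : pvAccountsA.keys =
      ["mosfire", "hires", "osiris", "lris", "nires", "deimos", "esi", "nirc2",
       "nirspec", "kcwi"] := by decide
  have h1 : pvAccountsA.getD "mosfire" [] = pvNamesB "mosfire" "moseng" := by decide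
  have h2 : pvAccountsA.getD "hires" [] = pvNamesB "hires" "hireseng" := by decide
  have h3 : pvAccountsA.getD "osiris" [] = pvNamesB "osiris" "osiriseng" := by decide
  have h4 : pvAccountsA.getD "lris" [] = pvNamesB "lris" "lriseng" := by decide
  have h5 : pvAccountsA.getD "nires" [] = pvNamesB "nires" "nireseng" := by decide
  have h6 : pvAccountsA.getD "deimos" [] = pvNamesB "deimos" "dmoseng" := by decide
  have h7 : pvAccountsA.getD "esi" [] = pvNamesB "esi" "esieng" := by decide
  have h8 : pvAccountsA.getD "nirc2" [] = pvNamesB "nirc" "nirceng" := by decide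
  have h9 : pvAccountsA.getD "nirspec" [] = pvNamesB "nirspec" "nirspeceng" := by decide
  have h10 : pvAccountsA.getD "kcwi" [] = pvNamesB "kcwi" "kcwieng" := by decide
  have t1 : pvTelescopeA.getD "mosfire" 0 = 1 := by decide
  have t2 : pvTelescopeA.getD "hires" 0 = 1 := by decide
  have t3 : pvTelescopeA.getD "osiris" 0 = 1 := by decide
  have t4 : pvTelescopeA.getD "lris" 0 = 1 := by decide
  have t5 : pvTelescopeA.getD "nires" 0 = 2 := by decide
  have t6 : pvTelescopeA.getD "deimos" 0 = 2 := by decide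
  have t7 : pvTelescopeA.getD "esi" 0 = 2 := by decide
  have t8 : pvTelescopeA.getD "nirc2" 0 = 2 := by decide
  have t9 : pvTelescopeA.getD "nirspec" 0 = 2 := by decide
  have t10 : pvTelescopeA.getD "kcwi" 0 = 2 := by decide
  unfold determine_instrument determine_instrument_alt
  rw [hk]
  simp only [pvLoopA, h1, h2, h3, h4, h5, h6, h7, h8, h9, h10,
    t1, t2, t3, t4, t5, t6, t7, t8, t9, t10]
  rw [show pvTableB = pvDataB.flatMap
      (fun q => (pvNamesB q.2.1 q.2.2.1).map (fun s => (s, q.1, q.2.2.2))) from rfl]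
  simp only [pvDataB, List.flatMap_cons, List.flatMap_nil, List.append_nil]
  rw [pvLookupB_block, pvLookupB_block, pvLookupB_block, pvLookupB_block,
    pvLookupB_block, pvLookupB_block, pvLookupB_block, pvLookupB_block,
    pvLookupB_block,
    ← List.append_nil ((pvNamesB "kcwi" "kcwieng").map (fun s => (s, ("kcwi", (2 : Int))))),
    pvLookupB_block]
  split_ifs <;> rfl

-- ===== VERDICT (by name: the statement is the Claim_ definition above) =====
theorem determine_instrument_spec : Claim_equal_determine_instrument := by
  intro a _
  unfold Spec_determine_instrument
  exact determine_instrument_spec' a
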